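-- pv_equiv track=rewrite | github.com/MatheusssGM/Grafos | etapa2/grasp.py | custo_total
-- ===== SOURCE A (Python) =====
-- def custo_total(rotas, matriz_distancias, deposito):
--     custo = 0
--     for rota in rotas:
--         if not rota:
--             continue
--         custo += matriz_distancias[deposito][rota[0]["origem"]]
--         for i in range(len(rota) - 1):
--             custo += matriz_distancias[rota[i]["destino"]][rota[i+1]["origem"]]
--         custo += matriz_distancias[rota[-1]["destino"]][deposito]
--     return custo
-- ===== SOURCE B (Python) =====
-- def custo_total(rotas, matriz_distancias, deposito):
--     # collect every traversed edge, aggregate multiplicities, then one weighted sum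
--     edges = []
--     for rota in rotas:
--         if not rota:
--             continue
--         prev = deposito
--         for r in rota:
--             edges.append((prev, r["origem"]))
--             prev = r["destino"]
--         edges.append((prev, deposito))
--     counts = {}
--     for e in edges:
--         counts[e] = counts.get(e, 0) + 1
--     return sum(matriz_distancias[f][t] * c for (f, t), c in counts.items())
-- ===== Notes on version B (the rewrite author's own statement) =====
-- stated objective: alternative
-- what changed: Instead of summing matrix entries edge-by-edge as A does, B first flattens all routes into one global edge list with a threaded previous-node, aggregates edge multiplicities in a dict, and returns one weighted sum of distinct matrix entries times their counts.
import Mathlib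
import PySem

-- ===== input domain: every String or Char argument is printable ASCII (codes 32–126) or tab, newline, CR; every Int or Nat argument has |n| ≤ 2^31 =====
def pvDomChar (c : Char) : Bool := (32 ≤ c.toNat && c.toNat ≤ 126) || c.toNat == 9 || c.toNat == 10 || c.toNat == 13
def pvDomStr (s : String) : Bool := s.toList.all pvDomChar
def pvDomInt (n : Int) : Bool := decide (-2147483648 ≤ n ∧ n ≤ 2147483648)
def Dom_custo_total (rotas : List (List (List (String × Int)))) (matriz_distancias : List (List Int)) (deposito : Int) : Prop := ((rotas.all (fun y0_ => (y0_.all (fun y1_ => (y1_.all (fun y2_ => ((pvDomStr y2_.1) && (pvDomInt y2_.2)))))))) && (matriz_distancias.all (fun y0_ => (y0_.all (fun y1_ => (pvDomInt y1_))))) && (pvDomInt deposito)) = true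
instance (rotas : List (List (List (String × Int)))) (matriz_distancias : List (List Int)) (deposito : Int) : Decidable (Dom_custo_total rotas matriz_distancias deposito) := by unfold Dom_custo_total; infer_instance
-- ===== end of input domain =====

-- B replaces A's edge-by-edge accumulation with a different pipeline: flatten all routes into
-- one global edge list, aggregate edge multiplicities in a dict, then one weighted sum of
-- distinct matrix entries times their counts (objective: alternative algorithm; same cost).

-- shared small helpers: dict lookup r["origem"] / r["destino"] (first match, per the assoc-list
-- convention; default 0 is never reached under Pre_) and the matrix access m[x][y]
def oOf (r : List (String × Int)) : Int := (List.lookup "origem" r).getD 0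
def dOf (r : List (String × Int)) : Int := (List.lookup "destino" r).getD 0
def mEntry (m : List (List Int)) (x y : Int) : Int :=
  PySem.List.pyGetD (PySem.List.pyGetD m x []) y 0

-- ===== PORT A =====
def custo_total (rotas : List (List (List (String × Int)))) (matriz_distancias : List (List Int)) (deposito : Int) : Int :=
  rotas.foldl (fun custo rota =>
    if rota = [] then custo
    else
      let c1 := custo + mEntry matriz_distancias deposito (oOf (PySem.List.pyGetD rota 0 []))
      let c2 := (PySem.List.pyRange 0 ((rota.length : Int) - 1) 1).foldl
        (fun acc i => acc + mEntry matriz_distancias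
            (dOf (PySem.List.pyGetD rota i []))
            (oOf (PySem.List.pyGetD rota (i + 1) []))) c1
      c2 + mEntry matriz_distancias (dOf (PySem.List.pyGetD rota (-1) [])) deposito) 0

-- ===== PORT B =====
def custo_total_alt (rotas : List (List (List (String × Int)))) (matriz_distancias : List (List Int)) (deposito : Int) : Int :=
  let edges := rotas.foldl (fun es rota =>
    if rota = [] then es
    else
      let s := rota.foldl (fun (s : List (Int × Int) × Int) r =>
        (s.1 ++ [(s.2, oOf r)], dOf r)) (es, deposito)
      s.1 ++ [(s.2, deposito)]) []
  let counts := edges.foldl (fun (d : PySem.Dict (Int × Int) Int) e =>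
    d.insert e (d.getD e 0 + 1)) PySem.Dict.empty
  (counts.items.map (fun p => mEntry matriz_distancias p.1.1 p.1.2 * p.2)).sum

-- ===== PRECONDITION & SPEC =====
-- the edge list of one route, threading the previous node (prev starts at the depot)
def routeEdges (dep : Int) : Int → List (List (String × Int)) → List (Int × Int)
  | prev, [] => [(prev, dep)]
  | prev, r :: rs => (prev, oOf r) :: routeEdges dep (dOf r) rs

-- matrix access m[x][y] succeeds (Python negative-index rule included)
def accB (m : List (List Int)) (x y : Int) : Bool :=
  match PySem.List.pyGet? m x with
  | some row => decide (PySem.Raise.InRange row.length y)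
  | none => false

-- Pre_ = exactly the inputs on which the Python A raises no exception: every record of a
-- non-empty route has both keys "origem" and "destino", and every traversed edge (depot→first
-- origin, each destination→next origin, last destination→depot) indexes inside the matrix.
def Pre_custo_total (rotas : List (List (List (String × Int)))) (matriz_distancias : List (List Int)) (deposito : Int) : Prop :=
  ∀ rota ∈ rotas, rota ≠ [] →
    (∀ r ∈ rota, (List.lookup "origem" r).isSome ∧ (List.lookup "destino" r).isSome) ∧
    (∀ p ∈ routeEdges deposito deposito rota, accB matriz_distancias p.1 p.2 = true)
instance (rotas : List (List (List (String × Int)))) (matriz_distancias : List (List Int)) (deposito : Int) : Decidable (Pre_custo_total rotas matriz_distancias deposito) := by unfold Pre_custo_total; infer_instance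

def pvWitness_custo_total : (List (List (List (String × Int)))) × List (List Int) × Int :=
  ([[[("origem", 1), ("destino", 0)]], []], [[3, 4], [5, 6]], 0)

def Spec_custo_total (rotas : List (List (List (String × Int)))) (matriz_distancias : List (List Int)) (deposito : Int) (out : Int) : Prop := out = custo_total_alt rotas matriz_distancias deposito
instance (rotas : List (List (List (String × Int)))) (matriz_distancias : List (List Int)) (deposito : Int) (out : Int) : Decidable (Spec_custo_total rotas matriz_distancias deposito out) := by unfold Spec_custo_total; infer_instance

-- ===== CLAIM (what is proved, stated in full; the proofs are below) =====
def Claim_equal_custo_total : Prop := ∀ (rotas : List (List (List (String × Int)))) (matriz_distancias : List (List Int)) (deposito : Int), Dom_custo_total rotas matriz_distancias deposito → Pre_custo_total rotas matriz_distancias deposito → Spec_custo_total rotas matriz_distancias deposito (custo_total rotas matriz_distancias deposito)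

-- ===== LEMMAS AND PROOFS =====

-- the edge list of a non-empty route minus its first edge: (d_0,o_1), …, (d_{k-1},dep)
def innerEdges (dep : Int) : List (List (String × Int)) → List (Int × Int)
  | [] => []
  | [x] => [(dOf x, dep)]
  | x :: y :: ys => (dOf x, oOf y) :: innerEdges dep (y :: ys)

lemma innerEdges_eq_routeEdges (dep : Int) :
    ∀ (x : List (String × Int)) (xs : List (List (String × Int))),
      innerEdges dep (x :: xs) = routeEdges dep (dOf x) xs := by
  intro x xs
  induction xs generalizing x with
  | nil => simp [innerEdges, routeEdges]
  | cons y ys ih => simp [innerEdges, routeEdges, ih y]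

set_option maxHeartbeats 1000000 in
lemma A_inner_sum (m : List (List Int)) (dep : Int) :
    ∀ (x : List (String × Int)) (xs : List (List (String × Int))),
      ((PySem.List.pyRange 0 (((x :: xs : List _).length : Int) - 1) 1).map
          (fun i => mEntry m (dOf (PySem.List.pyGetD (x :: xs) i []))
                             (oOf (PySem.List.pyGetD (x :: xs) (i + 1) [])))).sum
        + mEntry m (dOf (PySem.List.pyGetD (x :: xs) (-1) [])) dep
      = ((innerEdges dep (x :: xs)).map (fun p => mEntry m p.1 p.2)).sum := by
  intro x xs
  induction xs generalizing x with
  | nil =>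
      have h0 : (((x :: ([] : List (List (String × Int)))).length : Int) - 1) = 0 := by simp
      rw [h0, PySem.List.pyRange_one_eq_nil le_rfl]
      have hx : PySem.List.pyGetD ([x] : List (List (String × Int))) (-1) ([] : List (String × Int)) = x := by
        simp [pysem]
      rw [hx]
      simp [innerEdges]
  | cons y ys ih =>
      have hlen : ((x :: y :: ys : List _).length : Int) - 1 = ((y :: ys : List _).length : Int) := by
        simp only [List.length_cons]; push_cast; omega
      rw [hlen]
      have hcons : PySem.List.pyRange 0 ((y :: ys : List _).length : Int) 1
          = 0 :: PySem.List.pyRange 1 ((y :: ys : List _).length : Int) 1 :=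
        PySem.List.pyRange_one_cons (Int.natCast_pos.mpr (List.length_pos_of_ne_nil (by simp)))
      rw [hcons]
      have hshift : (PySem.List.pyRange 1 ((y :: ys : List _).length : Int) 1).map
            (fun i => mEntry m (dOf (PySem.List.pyGetD (x :: y :: ys) i []))
                               (oOf (PySem.List.pyGetD (x :: y :: ys) (i + 1) [])))
          = (PySem.List.pyRange 0 (((y :: ys : List _).length : Int) - 1) 1).map
            (fun i => mEntry m (dOf (PySem.List.pyGetD (y :: ys) i []))
                               (oOf (PySem.List.pyGetD (y :: ys) (i + 1) []))) := by
        rw [PySem.List.pyRange_one, PySem.List.pyRange_one]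
        simp only [List.map_map, sub_zero]
        refine List.map_congr_left ?_
        intro k hk
        simp only [Function.comp]
        have h2 : (1 : Int) + (k : Int) + 1 = ((k + 1 + 1 : Nat) : Int) := by push_cast; ring
        have h1 : (1 : Int) + (k : Int) = ((k + 1 : Nat) : Int) := by push_cast; ring
        have h4 : (0 : Int) + (k : Int) + 1 = ((k + 1 : Nat) : Int) := by push_cast; ring
        have h3 : (0 : Int) + (k : Int) = ((k : Nat) : Int) := by push_cast; ring
        rw [h2, h1, h4, h3]
        simp only [PySem.List.pyGetD_natCast, List.getD_cons_succ]
      rw [List.map_cons, List.sum_cons, hshift]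
      have hlast : PySem.List.pyGetD (x :: y :: ys) (-1) ([] : List (String × Int))
          = PySem.List.pyGetD (y :: ys) (-1) [] := by simp [pysem]
      rw [add_assoc, hlast, ih y]
      simp [pysem, innerEdges]

-- A's loop body adds exactly the weight of this route's edge list
lemma body_eq (m : List (List Int)) (dep : Int) (c : Int) (rota : List (List (String × Int))) :
    (if rota = [] then c
     else
       let c1 := c + mEntry m dep (oOf (PySem.List.pyGetD rota 0 []))
       let c2 := (PySem.List.pyRange 0 ((rota.length : Int) - 1) 1).foldl
         (fun acc i => acc + mEntry m (dOf (PySem.List.pyGetD rota i []))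
             (oOf (PySem.List.pyGetD rota (i + 1) []))) c1
       c2 + mEntry m (dOf (PySem.List.pyGetD rota (-1) [])) dep)
    = (if rota = [] then c
       else c + ((routeEdges dep dep rota).map (fun p => mEntry m p.1 p.2)).sum) := by
  cases rota with
  | nil => rfl
  | cons x xs =>
      simp only [List.cons_ne_nil]
      rw [PySem.List.foldl_add]
      have hr : routeEdges dep dep (x :: xs) = (dep, oOf x) :: innerEdges dep (x :: xs) := by
        rw [routeEdges, innerEdges_eq_routeEdges]
      rw [hr]
      simp only [List.map_cons, List.sum_cons]
      rw [add_assoc, ← A_inner_sum m dep x xs]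
      simp [pysem]
      ring

-- A = sum of route weights
lemma A_eq_sum (m : List (List Int)) (dep : Int) (rotas : List (List (List (String × Int)))) :
    ∀ c : Int, rotas.foldl (fun custo rota =>
      if rota = [] then custo
      else
        let c1 := custo + mEntry m dep (oOf (PySem.List.pyGetD rota 0 []))
        let c2 := (PySem.List.pyRange 0 ((rota.length : Int) - 1) 1).foldl
          (fun acc i => acc + mEntry m (dOf (PySem.List.pyGetD rota i []))
              (oOf (PySem.List.pyGetD rota (i + 1) []))) c1
        c2 + mEntry m (dOf (PySem.List.pyGetD rota (-1) [])) dep) c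
    = c + (rotas.map (fun rota => if rota = [] then 0
        else ((routeEdges dep dep rota).map (fun p => mEntry m p.1 p.2)).sum)).sum := by
  induction rotas with
  | nil => intro c; simp
  | cons rota rs ih =>
      intro c
      rw [List.foldl_cons, body_eq m dep c rota, List.map_cons, List.sum_cons, ih]
      by_cases h : rota = [] <;> simp [h] <;> ring

-- B's inner pair-state fold appends exactly this route's edge list
lemma inner_fold_edges (dep : Int) :
    ∀ (rota : List (List (String × Int))) (es : List (Int × Int)) (prev : Int),
      (rota.foldl (fun (s : List (Int × Int) × Int) r =>
        (s.1 ++ [(s.2, oOf r)], dOf r)) (es, prev)).1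
        ++ [((rota.foldl (fun (s : List (Int × Int) × Int) r =>
        (s.1 ++ [(s.2, oOf r)], dOf r)) (es, prev)).2, dep)]
      = es ++ routeEdges dep prev rota := by
  intro rota
  induction rota with
  | nil => intro es prev; simp [routeEdges]
  | cons r rs ih =>
      intro es prev
      simp only [List.foldl_cons]
      rw [ih (es ++ [(prev, oOf r)]) (dOf r)]
      simp [routeEdges]

-- B's outer fold builds the flattened edge list of all non-empty routes
lemma edges_eq_flat (dep : Int) (rotas : List (List (List (String × Int)))) :
    ∀ es : List (Int × Int),
      rotas.foldl (fun es rota =>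
        if rota = [] then es
        else
          let s := rota.foldl (fun (s : List (Int × Int) × Int) r =>
            (s.1 ++ [(s.2, oOf r)], dOf r)) (es, dep)
          s.1 ++ [(s.2, dep)]) es
      = es ++ rotas.flatMap (fun rota => if rota = [] then [] else routeEdges dep dep rota) := by
  induction rotas with
  | nil => intro es; simp
  | cons rota rs ih =>
      intro es
      rw [List.foldl_cons]
      by_cases h : rota = []
      · simp only [h, if_pos rfl, List.flatMap_cons, if_pos rfl]
        rw [ih]; simp
      · simp only [if_neg h, List.flatMap_cons, if_neg h]
        rw [inner_fold_edges dep rota es dep, ih]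
        simp
        
-- List.count is the same under any lawful BEq instance
theorem count_beq_congr {α : Type} [DecidableEq α] [inst : BEq α] [LawfulBEq α] (x : α) (l : List α) :
    @List.count α inst x l = @List.count α instBEqOfDecidableEq x l := by
  induction l with
  | nil => rfl
  | cons a as ih =>
      rw [@List.count_cons _ inst, @List.count_cons _ instBEqOfDecidableEq, ih]
      congr 1
      by_cases h : a = x <;> simp [h]

-- weighted sum over distinct elements with multiplicities = plain sum over the list
lemma dedup_count_sum (l : List (Int × Int)) (w : (Int × Int) → Int) :
    ((PySem.List.dedup l).map (fun k => w k * (l.count k : Int))).sum = (l.map w).sum := by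
  have hnd := PySem.List.nodup_dedup (xs := l)
  have h1 := List.sum_toFinset (fun k => w k * (l.count k : Int)) hnd
  have hfs : (PySem.List.dedup l).toFinset = l.toFinset := by
    ext x; simp [List.mem_toFinset, PySem.List.mem_dedup]
  rw [← h1, hfs, Finset.sum_list_map_count l w]
  refine Finset.sum_congr rfl ?_
  intro x _
  rw [nsmul_eq_mul, count_beq_congr]
  ring

-- sum over a flattened list = sum of the per-block sums
lemma flat_sum {α : Type} (l : List α) (g : α → List (Int × Int)) (w : (Int × Int) → Int) :
    ((l.flatMap g).map w).sum = (l.map (fun a => ((g a).map w).sum)).sum := by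
  induction l with
  | nil => simp
  | cons a as ih => simp [List.flatMap_cons, ih]

-- ===== VERDICT (by name: the statement is the Claim_ definition above) =====
theorem custo_total_spec : Claim_equal_custo_total := by
  intro rotas m dep _ _
  unfold Spec_custo_total custo_total
  rw [A_eq_sum m dep rotas 0]
  simp only [custo_total_alt]
  rw [edges_eq_flat dep rotas []]
  rw [PySem.Dict.foldl_insert_getD_add_one_eq_counter, PySem.Dict.items_counter]
  rw [← PySem.List.dedup_eq_ofList]
  simp only [List.map_map, Function.comp_def, List.nil_append]
  rw [dedup_count_sum _ (fun p => mEntry m p.1 p.2)]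
  rw [flat_sum]
  simp only [apply_ite (fun l : List (Int × Int) => (l.map (fun p => mEntry m p.1 p.2)).sum),
    List.map_nil, List.sum_nil]
  ring
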